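-- pv_equiv track=rewrite | github.com/lelouch248/pre_prod_validation | main.py | find_top_level_keyword
-- ===== SOURCE A (Python) =====
-- def find_top_level_keyword(sql: str, keyword: str, start: int = 0) -> int:
--     kw = keyword.upper()
--     i = start
--     depth = 0
--     in_single = False
--     in_double = False
--     while i < len(sql):
--         c = sql[i]
--         if c == "'" and not in_double:
--             in_single = not in_single
--         elif c == '"' and not in_single:
--             in_double = not in_double
--         elif not in_single and not in_double:
--             if c == "(":
--                 depth += 1
--             elif c == ")":
--                 if depth > 0:
--                     depth -= 1
--         # if at depth 0 and not in quotes, try match keyword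
--         if depth == 0 and not in_single and not in_double:
--             fragment = sql[i:i+len(kw)]
--             if fragment.upper() == kw:
--                 # ensure word boundary
--                 prev = sql[i-1] if i>0 else " "
--                 nxt = sql[i+len(kw)] if i+len(kw) < len(sql) else " "
--                 if not prev.isalnum() and not nxt.isalnum():
--                     return i
--         i += 1
--     return -1
-- ===== SOURCE B (Python) =====
-- def find_top_level_keyword(sql: str, keyword: str, start: int = 0) -> int:
--     kw = keyword.upper()
--     n = len(sql)
--     m = len(kw)
--     # pass 1: top[k] says whether position start+k is at depth 0 and outside quotes
--     # (state taken AFTER consuming that character, as the matching needs it)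
--     top = []
--     depth = 0
--     ins = False
--     ind = False
--     for c in sql[start:]:
--         if c == "'" and not ind:
--             ins = not ins
--         elif c == '"' and not ins:
--             ind = not ind
--         elif not ins and not ind:
--             if c == '(':
--                 depth += 1
--             elif c == ')' and depth > 0:
--                 depth -= 1
--         top.append(depth == 0 and not ins and not ind)
--     # pass 2: hop between keyword occurrences on the uppercased SQL with str.find
--     up = sql.upper()
--     i = up.find(kw, start)
--     while 0 <= i < n:
--         if top[i - start]:
--             prev = sql[i - 1] if i > 0 else " "
--             nxt = sql[i + m] if i + m < n else " "
--             if not prev.isalnum() and not nxt.isalnum():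
--                 return i
--         i = up.find(kw, i + 1)
--     return -1
-- ===== Notes on version B (the rewrite author's own statement) =====
-- stated objective: faster
-- what changed: A's single interleaved per-character loop (state machine plus a per-position slice/upper keyword comparison) is split into two passes: one scan records a top-level mask, then the search hops directly between keyword occurrences with str.find on the uppercased SQL instead of slicing-and-comparing at every position.
-- outside the precondition, e.g. on find_top_level_keyword('SELECT 1', 'select', -1): A returns 0, B returns -1; on find_top_level_keyword('ab', 'ab', -2): A returns 0, B raises IndexError
import Mathlib
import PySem

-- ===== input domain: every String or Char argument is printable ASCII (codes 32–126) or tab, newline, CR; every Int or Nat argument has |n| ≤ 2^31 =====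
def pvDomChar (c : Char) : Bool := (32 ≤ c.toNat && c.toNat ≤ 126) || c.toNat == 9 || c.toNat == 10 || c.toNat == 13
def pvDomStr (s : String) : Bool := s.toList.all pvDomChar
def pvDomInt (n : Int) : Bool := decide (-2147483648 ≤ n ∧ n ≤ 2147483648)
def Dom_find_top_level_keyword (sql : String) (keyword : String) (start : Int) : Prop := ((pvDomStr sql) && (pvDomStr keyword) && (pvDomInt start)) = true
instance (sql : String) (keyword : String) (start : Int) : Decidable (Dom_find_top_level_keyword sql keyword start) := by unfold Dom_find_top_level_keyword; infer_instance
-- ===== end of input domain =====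

-- B splits A's single interleaved per-char loop into a mask-building scan plus a
-- str.find-hopping search over keyword occurrences (alternative decomposition);
-- equivalence is proved for start >= 0 (Pre_ below).


-- ===== PORT A =====
-- A's while loop: i, depth, in_single, in_double carried through a structural recursion
-- whose fuel is the loop's exact iteration count (len(sql) - i for the initial i).
def pvLoopA (s kw : List Char) : Nat → Int → Int → Bool → Bool → Int
  | 0, _, _, _, _ => -1
  | fuel + 1, i, depth, ins, ind =>
    if i < (s.length : Int) then
      -- c = sql[i]; total form of the subscript: every i reached from a start ≥ 0 is in range,
      -- Python raises IndexError instead only for start < -len(sql), which Pre_ excludes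
      let c := PySem.List.pyGetD s i ' '
      let st : Int × Bool × Bool :=
        if c == '\'' && !ind then (depth, !ins, ind)
        else if c == '"' && !ins then (depth, ins, !ind)
        else if !ins && !ind then
          if c == '(' then (depth + 1, ins, ind)
          else if c == ')' && decide (0 < depth) then (depth - 1, ins, ind)
          else (depth, ins, ind)
        else (depth, ins, ind)
      if st.1 == 0 && !st.2.1 && !st.2.2 then
        let fragment := PySem.List.slice s (some i) (some (i + (kw.length : Int)))
        if PySem.Chars.upper fragment == kw then
          let prev := if 0 < i then PySem.List.pyGetD s (i - 1) ' ' else ' '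
          let nxt := if i + (kw.length : Int) < (s.length : Int) then PySem.List.pyGetD s (i + (kw.length : Int)) ' ' else ' '
          if !(PySem.Chars.isalnum prev) && !(PySem.Chars.isalnum nxt) then i
          else pvLoopA s kw fuel (i + 1) st.1 st.2.1 st.2.2
        else pvLoopA s kw fuel (i + 1) st.1 st.2.1 st.2.2
      else pvLoopA s kw fuel (i + 1) st.1 st.2.1 st.2.2
    else -1

def find_top_level_keyword (sql : String) (keyword : String) (start : Int) : Int :=
  pvLoopA sql.toList (PySem.Chars.upper keyword.toList)
    (((sql.toList.length : Int) - start).toNat) start 0 false false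

-- ===== PORT B =====
-- the quote/paren state machine step of B's pass 1
def pvStepB (st : Int × Bool × Bool) (c : Char) : Int × Bool × Bool :=
  match st with
  | (depth, ins, ind) =>
    if c == '\'' && !ind then (depth, !ins, ind)
    else if c == '"' && !ins then (depth, ins, !ind)
    else if !ins && !ind then
      if c == '(' then (depth + 1, ins, ind)
      else if c == ')' && decide (0 < depth) then (depth - 1, ins, ind)
      else (depth, ins, ind)
    else (depth, ins, ind)

def pvTopOK (st : Int × Bool × Bool) : Bool := st.1 == 0 && !st.2.1 && !st.2.2

-- B's while loop: guard, mask lookup, boundary test, then hop to the next find result;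
-- fuel len(sql)+1 bounds the iterations (i strictly grows inside [0, len) while the guard holds).
def pvHop (s up kw : List Char) (top : List Bool) (start : Int) : Nat → Int → Int
  | 0, _ => -1
  | fuel + 1, i =>
    if 0 ≤ i ∧ i < (s.length : Int) then
      if PySem.List.pyGetD top (i - start) false then
        let prev := if 0 < i then PySem.List.pyGetD s (i - 1) ' ' else ' '
        let nxt := if i + (kw.length : Int) < (s.length : Int) then PySem.List.pyGetD s (i + (kw.length : Int)) ' ' else ' '
        if !(PySem.Chars.isalnum prev) && !(PySem.Chars.isalnum nxt) then i
        else pvHop s up kw top start fuel (PySem.Chars.findFrom up kw (i + 1) none)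
      else pvHop s up kw top start fuel (PySem.Chars.findFrom up kw (i + 1) none)
    else -1

def find_top_level_keyword_alt (sql : String) (keyword : String) (start : Int) : Int :=
  let s := sql.toList
  let kw := PySem.Chars.upper keyword.toList
  let top := ((PySem.List.slice s (some start) none).foldl
      (fun (acc : List Bool × (Int × Bool × Bool)) c =>
        let st := pvStepB acc.2 c
        (acc.1 ++ [pvTopOK st], st)) ([], (0, false, false))).1
  let up := PySem.Chars.upper s
  pvHop s up kw top start (s.length + 1) (PySem.Chars.findFrom up kw start none)

-- ===== PRECONDITION & SPEC =====
-- Pre_ excludes negative start: there A either raises IndexError (start < -len(sql)) or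
-- scans from a Python negative-index wraparound position, an accident of A's manual
-- indexing that no caller relies on; B's ordinary slice/find clamping differs there.
def Pre_find_top_level_keyword (sql : String) (keyword : String) (start : Int) : Prop := 0 ≤ start
instance (sql : String) (keyword : String) (start : Int) : Decidable (Pre_find_top_level_keyword sql keyword start) := by unfold Pre_find_top_level_keyword; infer_instance

def pvWitness_find_top_level_keyword : String × String × Int := ("(a) OR b", "or", 0)

def Spec_find_top_level_keyword (sql : String) (keyword : String) (start : Int) (out : Int) : Prop := out = find_top_level_keyword_alt sql keyword start
instance (sql : String) (keyword : String) (start : Int) (out : Int) : Decidable (Spec_find_top_level_keyword sql keyword start out) := by unfold Spec_find_top_level_keyword; infer_instance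

-- ===== CLAIM (what is proved, stated in full; the proofs are below) =====
def Claim_equal_find_top_level_keyword : Prop := ∀ (sql : String) (keyword : String) (start : Int), Dom_find_top_level_keyword sql keyword start → Pre_find_top_level_keyword sql keyword start → Spec_find_top_level_keyword sql keyword start (find_top_level_keyword sql keyword start)

-- ===== LEMMAS AND PROOFS =====

-- a nonnegative find result from position k is ≥ k
theorem pvFindFrom_ge (up kw : List Char) (k : Int) (h0 : 0 ≤ k)
    (hnn : 0 ≤ PySem.Chars.findFrom up kw k none) :
    k ≤ PySem.Chars.findFrom up kw k none := by
  by_cases hle : k ≤ (up.length : Int)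
  · have hk : k = ((k.toNat : Nat) : Int) := by omega
    rw [hk] at hnn ⊢
    rw [PySem.Chars.findFrom_natCast up kw k.toNat (by omega)] at hnn ⊢
    split at hnn
    · omega
    · next hne =>
      simp only [if_neg hne]
      have := PySem.Chars.neg_one_le_find (up.drop k.toNat) kw
      omega
  · exfalso
    simp only [PySem.Chars.findFrom] at hnn
    rw [if_neg (by omega : ¬ k < 0), if_pos (by omega : (up.length : Int) < k)] at hnn
    omega

-- a past-the-end start makes find return -1 (CPython clamps, then e < st)
theorem pvFindFrom_big (up kw : List Char) (st : Int) (h0 : 0 ≤ st) (h : (up.length : Int) < st) :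
    PySem.Chars.findFrom up kw st none = -1 := by
  simp only [PySem.Chars.findFrom]
  rw [if_neg (by omega : ¬ st < 0), if_pos (by omega : (up.length : Int) < st)]

-- pvHop ignores the exact fuel once it covers the remaining distance
theorem pvHop_congr (s up kw : List Char) (top : List Bool) (a : Int) :
    ∀ (g1 g2 : Nat) (i : Int), 1 ≤ g1 → 1 ≤ g2 →
    (i < 0 ∨ (s.length : Int) < i + g1) → (i < 0 ∨ (s.length : Int) < i + g2) →
    pvHop s up kw top a g1 i = pvHop s up kw top a g2 i := by
  intro g1
  induction g1 with
  | zero => intro g2 i h1 _ _ _; omega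
  | succ g1 ih =>
    intro g2 i _ hg2 hb1 hb2
    obtain ⟨g2, rfl⟩ : ∃ g, g2 = g + 1 := ⟨g2 - 1, by omega⟩
    rw [pvHop, pvHop]
    by_cases hg : 0 ≤ i ∧ i < (s.length : Int)
    · rw [if_pos hg, if_pos hg]
      have hrec : pvHop s up kw top a g1 (PySem.Chars.findFrom up kw (i + 1) none)
          = pvHop s up kw top a g2 (PySem.Chars.findFrom up kw (i + 1) none) := by
        have hge : ∀ g : Nat, (s.length : Int) < i + (g + 1) →
            (PySem.Chars.findFrom up kw (i + 1) none < 0 ∨ (s.length : Int) < PySem.Chars.findFrom up kw (i + 1) none + g) := by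
          intro g hlt
          by_cases hneg : PySem.Chars.findFrom up kw (i + 1) none < 0
          · exact Or.inl hneg
          · right
            have := pvFindFrom_ge up kw (i + 1) (by omega) (by omega)
            omega
        have hlt1 : (s.length : Int) < i + (g1 + 1) := by
          rcases hb1 with h | h
          · omega
          · push_cast at h ⊢; omega
        have hlt2 : (s.length : Int) < i + (g2 + 1) := by
          rcases hb2 with h | h
          · omega
          · push_cast at h ⊢; omega
        exact ih g2 _ (by omega) (by omega) (hge g1 hlt1) (hge g2 hlt2)
      simp only [hrec]
    · rw [if_neg hg, if_neg hg]

-- the mask values B's pass 1 appends, as a structural recursion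
def pvTops (st : Int × Bool × Bool) : List Char → List Bool
  | [] => []
  | c :: t => pvTopOK (pvStepB st c) :: pvTops (pvStepB st c) t

theorem pvBuild_eq (l : List Char) (acc : List Bool) (st : Int × Bool × Bool) :
    (l.foldl (fun (acc : List Bool × (Int × Bool × Bool)) c =>
        let st := pvStepB acc.2 c
        (acc.1 ++ [pvTopOK st], st)) (acc, st)).1 = acc ++ pvTops st l := by
  induction l generalizing acc st with
  | nil => simp [pvTops]
  | cons c t ih => simp [pvTops, List.foldl_cons, ih]

theorem pvTops_getD (l : List Char) (st : Int × Bool × Bool) (k : Nat) (hk : k < l.length) :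
    (pvTops st l).getD k false = pvTopOK (List.foldl pvStepB st (l.take (k + 1))) := by
  induction l generalizing st k with
  | nil => simp at hk
  | cons c t ih =>
    cases k with
    | zero => simp [pvTops]
    | succ k =>
      simp only [pvTops, List.getD_cons_succ, List.take_succ_cons, List.foldl_cons]
      exact ih (pvStepB st c) k (by simpa using hk)

theorem pvMatch_iff (s kw : List Char) (p : Nat) :
    PySem.Chars.upper (PySem.List.slice s (some (p : Int)) (some ((p : Int) + (kw.length : Int)))) = kw
      ↔ kw <+: (PySem.Chars.upper s).drop p := by
  rw [PySem.List.slice_natCast_add s p kw.length, List.prefix_iff_eq_take]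
  simp only [PySem.Chars.upper, List.map_take, List.map_drop]
  exact ⟨fun h => h.symm, fun h => h.symm⟩

-- the word-boundary test both ports perform at a candidate index
def pvBoundary (s kw : List Char) (i : Int) : Bool :=
  !(PySem.Chars.isalnum (if 0 < i then PySem.List.pyGetD s (i - 1) ' ' else ' ')) &&
  !(PySem.Chars.isalnum (if i + (kw.length : Int) < (s.length : Int) then PySem.List.pyGetD s (i + (kw.length : Int)) ' ' else ' '))

-- one non-matching step of A's loop
theorem pvLoopA_step (s kw : List Char) (fuel : Nat) (p : Nat) (hp : p < s.length) (d : Int) (ins ind : Bool)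
    (hnm : ¬ kw <+: (PySem.Chars.upper s).drop p) :
    pvLoopA s kw (fuel + 1) (p : Int) d ins ind =
      pvLoopA s kw fuel ((p : Int) + 1) (pvStepB (d, ins, ind) s[p]).1 (pvStepB (d, ins, ind) s[p]).2.1 (pvStepB (d, ins, ind) s[p]).2.2 := by
  have hfrag : (PySem.Chars.upper (PySem.List.slice s (some (p : Int)) (some ((p : Int) + (kw.length : Int)))) == kw) = false := by
    rw [beq_eq_false_iff_ne]
    exact fun h => hnm ((pvMatch_iff s kw p).mp h)
  have hc : PySem.List.pyGetD s (p : Int) ' ' = s[p] := by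
    rw [PySem.List.pyGetD_natCast]
    exact List.getD_eq_getElem s ' ' hp
  rcases hst : pvStepB (d, ins, ind) s[p] with ⟨d1, b1, b2⟩
  have hchain : (if (s[p] == '\'' && !ind) = true then (d, !ins, ind)
      else if (s[p] == '"' && !ins) = true then (d, ins, !ind)
      else if (!ins && !ind) = true then
        if (s[p] == '(') = true then (d + 1, ins, ind)
        else if (s[p] == ')' && decide (0 < d)) = true then (d - 1, ins, ind)
        else (d, ins, ind)
      else (d, ins, ind) : Int × Bool × Bool) = (d1, b1, b2) := by
    rw [← hst]; rfl
  rw [pvLoopA]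
  rw [if_pos (by exact_mod_cast hp)]
  simp only [hc, hchain, hfrag, Bool.false_eq_true, if_false]
  split <;> rfl

-- A's loop at a matching position: return on mask+boundary, else one more step
theorem pvLoopA_hit (s kw : List Char) (fuel : Nat) (p : Nat) (hp : p < s.length) (d : Int) (ins ind : Bool)
    (hm : kw <+: (PySem.Chars.upper s).drop p) :
    pvLoopA s kw (fuel + 1) (p : Int) d ins ind =
      if pvTopOK (pvStepB (d, ins, ind) s[p]) && pvBoundary s kw (p : Int) then (p : Int)
      else pvLoopA s kw fuel ((p : Int) + 1) (pvStepB (d, ins, ind) s[p]).1 (pvStepB (d, ins, ind) s[p]).2.1 (pvStepB (d, ins, ind) s[p]).2.2 := by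
  have hfrag : (PySem.Chars.upper (PySem.List.slice s (some (p : Int)) (some ((p : Int) + (kw.length : Int)))) == kw) = true := by
    rw [beq_iff_eq]
    exact (pvMatch_iff s kw p).mpr hm
  have hc : PySem.List.pyGetD s (p : Int) ' ' = s[p] := by
    rw [PySem.List.pyGetD_natCast]
    exact List.getD_eq_getElem s ' ' hp
  rcases hst : pvStepB (d, ins, ind) s[p] with ⟨d1, b1, b2⟩
  have hchain : (if (s[p] == '\'' && !ind) = true then (d, !ins, ind)
      else if (s[p] == '"' && !ins) = true then (d, ins, !ind)
      else if (!ins && !ind) = true then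
        if (s[p] == '(') = true then (d + 1, ins, ind)
        else if (s[p] == ')' && decide (0 < d)) = true then (d - 1, ins, ind)
        else (d, ins, ind)
      else (d, ins, ind) : Int × Bool × Bool) = (d1, b1, b2) := by
    rw [← hst]; rfl
  rw [pvLoopA]
  rw [if_pos (by exact_mod_cast hp)]
  simp only [hc, hchain, hfrag, if_true, pvTopOK, pvBoundary]
  by_cases h1 : (d1 == 0 && !b1 && !b2) = true <;>
    by_cases h2 : (!(PySem.Chars.isalnum (if 0 < (p : Int) then PySem.List.pyGetD s ((p : Int) - 1) ' ' else ' ')) &&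
      !(PySem.Chars.isalnum (if (p : Int) + (kw.length : Int) < (s.length : Int) then PySem.List.pyGetD s ((p : Int) + (kw.length : Int)) ' ' else ' '))) = true <;>
    simp [*]

-- one unfolding of B's while loop inside the guard
theorem pvHop_unfold (s up kw : List Char) (top : List Bool) (a : Int) (fuel : Nat) (i : Int)
    (h : 0 ≤ i ∧ i < (s.length : Int)) :
    pvHop s up kw top a (fuel + 1) i =
      if PySem.List.pyGetD top (i - a) false && pvBoundary s kw i then i
      else pvHop s up kw top a fuel (PySem.Chars.findFrom up kw (i + 1) none) := by
  rw [pvHop, if_pos h]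
  simp only [pvBoundary]
  by_cases h1 : PySem.List.pyGetD top (i - a) false = true <;>
    by_cases h2 : (!(PySem.Chars.isalnum (if 0 < i then PySem.List.pyGetD s (i - 1) ' ' else ' ')) &&
      !(PySem.Chars.isalnum (if i + (kw.length : Int) < (s.length : Int) then PySem.List.pyGetD s (i + (kw.length : Int)) ' ' else ' '))) = true <;>
    simp [*]

-- A returns -1 when no occurrence remains anywhere at or after p
theorem pvLoopA_none (s kw : List Char) (fuel : Nat) : ∀ (p : Nat) (st : Int × Bool × Bool),
    (∀ q : Nat, p ≤ q → ¬ kw <+: (PySem.Chars.upper s).drop q) →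
    pvLoopA s kw fuel (p : Int) st.1 st.2.1 st.2.2 = -1 := by
  induction fuel with
  | zero => intro p st H; rw [pvLoopA]
  | succ fuel ih =>
    intro p st H
    by_cases hp : p < s.length
    · rw [pvLoopA_step s kw fuel p hp st.1 st.2.1 st.2.2 (H p le_rfl)]
      have hcast : ((p : Int) + 1) = ((p + 1 : Nat) : Int) := by push_cast; ring
      rw [hcast]
      exact ih (p + 1) (pvStepB (st.1, st.2.1, st.2.2) s[p]) (fun q hq => H q (by omega))
    · rw [pvLoopA, if_neg (by exact_mod_cast hp)]

-- at the end of the string both loops are done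
theorem pvLoopA_end (s kw : List Char) (fuel : Nat) (d : Int) (ins ind : Bool) :
    pvLoopA s kw fuel (s.length : Int) d ins ind = -1 := by
  cases fuel with
  | zero => rw [pvLoopA]
  | succ fuel => rw [pvLoopA, if_neg (by omega)]

theorem pvHop_end (s kw : List Char) (top : List Bool) (a : Int) (fuel : Nat) :
    pvHop s (PySem.Chars.upper s) kw top a (fuel + 1)
      (PySem.Chars.findFrom (PySem.Chars.upper s) kw ((s.length : Nat) : Int) none) = -1 := by
  have hup : (PySem.Chars.upper s).length = s.length := by simp [PySem.Chars.upper]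
  rw [PySem.Chars.findFrom_natCast (PySem.Chars.upper s) kw s.length (by rw [hup])]
  split
  · rw [pvHop, if_neg (by omega : ¬ ((0 : Int) ≤ -1 ∧ (-1 : Int) < (s.length : Int)))]
  · next hne =>
    have hge := PySem.Chars.neg_one_le_find ((PySem.Chars.upper s).drop s.length) kw
    rw [pvHop, if_neg (by omega)]

-- A skips a stretch with no occurrences, only updating the state
theorem pvLoopA_skip (s kw : List Char) (t : Nat) : ∀ (fuel : Nat) (p : Nat) (st : Int × Bool × Bool),
    p + t ≤ s.length →
    (∀ q : Nat, p ≤ q → q < p + t → ¬ kw <+: (PySem.Chars.upper s).drop q) →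
    pvLoopA s kw (t + fuel) (p : Int) st.1 st.2.1 st.2.2 =
      pvLoopA s kw fuel ((p + t : Nat) : Int)
        (List.foldl pvStepB st ((s.drop p).take t)).1
        (List.foldl pvStepB st ((s.drop p).take t)).2.1
        (List.foldl pvStepB st ((s.drop p).take t)).2.2 := by
  induction t with
  | zero => intro fuel p st _ _; simp
  | succ t ih =>
    intro fuel p st hle H
    have hp : p < s.length := by omega
    rw [show t + 1 + fuel = (t + fuel) + 1 by omega]
    rw [pvLoopA_step s kw (t + fuel) p hp st.1 st.2.1 st.2.2 (H p le_rfl (by omega))]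
    have hcast : ((p : Int) + 1) = ((p + 1 : Nat) : Int) := by push_cast; ring
    rw [hcast]
    have := ih fuel (p + 1) (pvStepB (st.1, st.2.1, st.2.2) s[p]) (by omega)
      (fun q hq1 hq2 => H q (by omega) (by omega))
    rw [this]
    have hlist : (s.drop p).take (t + 1) = s[p] :: (s.drop (p + 1)).take t := by
      rw [List.drop_eq_getElem_cons hp, List.take_succ_cons]
    have harg : ((p + 1 + t : Nat) : Int) = ((p + (t + 1) : Nat) : Int) := by push_cast; ring
    rw [harg, hlist, List.foldl_cons]

-- key lemma: from any resume point j with the correctly accumulated state and enough fuel,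
-- A's remaining loop equals B's hop loop started at find(kw, j)
theorem pvKey (s kw : List Char) (a : Nat) : ∀ (fuel : Nat) (j : Nat) (st : Int × Bool × Bool),
    s.length ≤ j + fuel → a ≤ j → j ≤ s.length →
    st = List.foldl pvStepB (0, false, false) ((s.drop a).take (j - a)) →
    pvLoopA s kw fuel (j : Int) st.1 st.2.1 st.2.2 =
      pvHop s (PySem.Chars.upper s) kw (pvTops (0, false, false) (s.drop a)) (a : Int) (fuel + 1)
        (PySem.Chars.findFrom (PySem.Chars.upper s) kw (j : Int) none) := by
  have hup : (PySem.Chars.upper s).length = s.length := by simp [PySem.Chars.upper]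
  intro fuel
  induction fuel using Nat.strong_induction_on with
  | _ fuel ih =>
    intro j st hk ha hjn hst
    by_cases hjtop : j = s.length
    · subst hjtop
      rw [pvLoopA_end, pvHop_end]
    have hj : j < s.length := lt_of_le_of_ne hjn hjtop
    rw [PySem.Chars.findFrom_natCast (PySem.Chars.upper s) kw j (by omega)]
    by_cases hfind : PySem.Chars.find ((PySem.Chars.upper s).drop j) kw = -1
    · rw [if_pos hfind]
      rw [pvHop, if_neg (by omega : ¬ ((0 : Int) ≤ -1 ∧ (-1 : Int) < (s.length : Int)))]
      have hninf : ¬ kw <:+: (PySem.Chars.upper s).drop j :=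
        (PySem.Chars.find_eq_neg_one_iff _ _).mp hfind
      refine pvLoopA_none s kw fuel j st ?_
      intro q hq hpref
      have hd : (PySem.Chars.upper s).drop q = ((PySem.Chars.upper s).drop j).drop (q - j) := by
        rw [List.drop_drop]; congr 1; omega
      rw [hd] at hpref
      exact hninf (hpref.isInfix.trans (List.drop_suffix (q - j) _).isInfix)
    · rw [if_neg hfind]
      set f := PySem.Chars.find ((PySem.Chars.upper s).drop j) kw with hf
      have hf0 : 0 ≤ f := by
        have := PySem.Chars.neg_one_le_find ((PySem.Chars.upper s).drop j) kw
        omega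
      obtain ⟨hpre0, hmin⟩ := PySem.Chars.find_spec hf0
      have hfle : f ≤ (((PySem.Chars.upper s).drop j).length : Int) := PySem.Chars.find_le_length _ _
      have hlen : ((PySem.Chars.upper s).drop j).length = s.length - j := by
        rw [List.length_drop, hup]
      have hi0le : j + f.toNat ≤ s.length := by omega
      have hcast : ((j : Int) + f) = ((j + f.toNat : Nat) : Int) := by
        push_cast; omega
      have hprefi0 : kw <+: (PySem.Chars.upper s).drop (j + f.toNat) := by
        rwa [List.drop_drop] at hpre0
      have hi0lt : j + f.toNat < s.length := by
        by_contra hge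
        have : (PySem.Chars.upper s).drop (j + f.toNat) = [] := by
          apply List.drop_eq_nil_of_le; omega
        rw [this] at hprefi0
        have hkw : kw = [] := List.prefix_nil.mp hprefi0
        rw [hkw, PySem.Chars.find_nil] at hf
        omega
      -- split the fuel at the skipped stretch: fuel = (i0 - j) + (r + 1)
      obtain ⟨r, hr⟩ : ∃ r : Nat, fuel = f.toNat + (r + 1) := ⟨fuel - f.toNat - 1, by omega⟩
      rw [hr]
      -- skip the non-matching stretch [j, j + f.toNat)
      have hskip := pvLoopA_skip s kw f.toNat (r + 1) j st (by omega) ?hskipH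
      case hskipH =>
        intro q hq1 hq2 hpref
        have hd : (PySem.Chars.upper s).drop q = ((PySem.Chars.upper s).drop j).drop (q - j) := by
          rw [List.drop_drop]; congr 1; omega
        rw [hd] at hpref
        exact hmin (q - j) (by omega) hpref
      rw [hskip]
      set st' := List.foldl pvStepB st ((s.drop j).take f.toNat) with hst'
      have hst'0 : st' = List.foldl pvStepB (0, false, false) ((s.drop a).take (j + f.toNat - a)) := by
        rw [hst', hst, ← List.foldl_append]
        congr 1
        have hdj : s.drop j = (s.drop a).drop (j - a) := by
          rw [List.drop_drop]; congr 1; omega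
        rw [hdj, ← List.take_add]
        congr 1
        omega
      have hone : List.foldl pvStepB (0, false, false) ((s.drop a).take (j + f.toNat - a + 1)) = pvStepB st' s[j + f.toNat] := by
        rw [List.take_add_one]
        have hget : (s.drop a)[j + f.toNat - a]? = some s[j + f.toNat] := by
          rw [List.getElem?_drop, show a + (j + f.toNat - a) = j + f.toNat by omega]
          exact List.getElem?_eq_getElem hi0lt
        rw [hget, hst'0]
        simp [List.foldl_append]
      -- A's side at the hit position
      rw [pvLoopA_hit s kw r (j + f.toNat) hi0lt st'.1 st'.2.1 st'.2.2 hprefi0]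
      -- B's side at the hit position
      rw [hcast, pvHop_unfold s _ kw _ _ _ _ (by constructor <;> omega)]
      -- the mask entry is the state A just computed
      have hmask : PySem.List.pyGetD (pvTops (0, false, false) (s.drop a)) (((j + f.toNat : Nat) : Int) - (a : Int)) false
          = pvTopOK (pvStepB st' s[j + f.toNat]) := by
        rw [show ((j + f.toNat : Nat) : Int) - (a : Int) = ((j + f.toNat - a : Nat) : Int) by push_cast; omega]
        rw [PySem.List.pyGetD_natCast]
        rw [pvTops_getD (s.drop a) (0, false, false) (j + f.toNat - a) (by rw [List.length_drop]; omega)]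
        rw [hone]
      rw [hmask]
      by_cases hret : (pvTopOK (pvStepB (st'.1, st'.2.1, st'.2.2) s[j + f.toNat]) && pvBoundary s kw ((j + f.toNat : Nat) : Int)) = true
      · rw [if_pos hret, if_pos (by exact hret)]
      · rw [if_neg hret, if_neg (by exact hret)]
        rw [show ((j + f.toNat : Nat) : Int) + 1 = ((j + f.toNat + 1 : Nat) : Int) by push_cast; omega]
        have hIH := ih r (by omega) (j + f.toNat + 1) (pvStepB (st'.1, st'.2.1, st'.2.2) s[j + f.toNat]) (by omega) (by omega) (by omega)
          (by rw [show j + f.toNat + 1 - a = j + f.toNat - a + 1 by omega, hone])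
        rw [hIH]
        -- align the two fuels for B's loop
        refine pvHop_congr s _ kw _ _ (r + 1) (f.toNat + (r + 1)) _ (by omega) (by omega) ?_ ?_
        all_goals
          by_cases hneg : PySem.Chars.findFrom (PySem.Chars.upper s) kw (((j + f.toNat + 1 : Nat) : Int)) none < 0
          · exact Or.inl hneg
          · right
            have := pvFindFrom_ge (PySem.Chars.upper s) kw ((j + f.toNat + 1 : Nat) : Int) (by positivity) (by omega)
            push_cast at this ⊢
            omega

-- ===== VERDICT (by name: the statement is the Claim_ definition above) =====
theorem find_top_level_keyword_spec : Claim_equal_find_top_level_keyword := by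
  intro sql keyword start _hdom hpre
  have hpre' : (0 : Int) ≤ start := hpre
  unfold Spec_find_top_level_keyword find_top_level_keyword find_top_level_keyword_alt
  simp only []
  have hup : (PySem.Chars.upper sql.toList).length = sql.toList.length := by
    simp [PySem.Chars.upper]
  have hsl : PySem.List.slice sql.toList (some start) none = sql.toList.drop start.toNat :=
    PySem.List.slice_from sql.toList hpre'
  have htop : ((PySem.List.slice sql.toList (some start) none).foldl
      (fun (acc : List Bool × (Int × Bool × Bool)) c =>
        let st := pvStepB acc.2 c
        (acc.1 ++ [pvTopOK st], st)) ([], (0, false, false))).1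
      = pvTops (0, false, false) (sql.toList.drop start.toNat) := by
    rw [hsl, pvBuild_eq]
    simp
  have hcast : start = ((start.toNat : Nat) : Int) := (Int.toNat_of_nonneg hpre').symm
  rw [htop]
  by_cases hle : start.toNat ≤ sql.toList.length
  · have hkey := pvKey sql.toList (PySem.Chars.upper keyword.toList) start.toNat
      (sql.toList.length - start.toNat) start.toNat (0, false, false) (by omega) le_rfl hle (by simp)
    dsimp only at hkey
    rw [hcast, show (((sql.toList.length : Int) - (start.toNat : Int)).toNat) = sql.toList.length - start.toNat from by omega]
    rw [hkey]
    -- align B's fuel: len - a + 1 vs len + 1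
    refine pvHop_congr sql.toList _ _ _ _ _ _ _ (by omega) (by omega) ?_ ?_
    all_goals
      by_cases hneg : PySem.Chars.findFrom (PySem.Chars.upper sql.toList) (PySem.Chars.upper keyword.toList) ((start.toNat : Nat) : Int) none < 0
      · exact Or.inl hneg
      · right
        have := pvFindFrom_ge (PySem.Chars.upper sql.toList) (PySem.Chars.upper keyword.toList) ((start.toNat : Nat) : Int) (by positivity) (by omega)
        omega
  · have hfuel : ((sql.toList.length : Int) - start).toNat = 0 := by omega
    rw [hfuel, pvLoopA]
    rw [pvFindFrom_big (PySem.Chars.upper sql.toList) (PySem.Chars.upper keyword.toList) start hpre' (by omega)]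
    rw [pvHop, if_neg (by omega : ¬ ((0 : Int) ≤ -1 ∧ (-1 : Int) < (sql.toList.length : Int)))]
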